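-- pv_equiv track=rewrite | github.com/Akellems/ENNG-2112 | app2.py | default_coarse_map
-- ===== SOURCE A (Python) =====
-- from typing import List, Tuple, Optional, Dict, Any
--
-- def default_coarse_map(classes: List[str]) -> Dict[str, str]:
--     recyclable_keys = {
--         "recyclable", "cardboard", "paper", "paperboard", "carton",
--         "plastic", "plastics", "bottle", "bottles",
--         "glass", "jar", "jars",
--         "metal", "can", "cans", "tin", "tins",
--         "aluminum", "aluminium", "steel"
--     }
--     organic_keys = {
--         "organic", "food", "kitchen", "biodegradable", "compost",
--         "vegetable", "fruit", "leftover", "banana", "apple", "peel"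
--     }
--     trash_keys = {
--         "trash", "other", "unknown", "garbage", "waste",
--         "cloth", "clothes", "shoe", "shoes", "ceramic", "styrofoam"
--     }
--
--     mapping = {}
--     for c in classes:
--         base = c.strip().lower().replace("_", " ").replace("-", " ")
--         if base in recyclable_keys or any(k in base for k in recyclable_keys):
--             mapping[c] = "Recyclable"
--         elif base in organic_keys or any(k in base for k in organic_keys):
--             mapping[c] = "Organic"
--         elif base in trash_keys or any(k in base for k in trash_keys):
--             mapping[c] = "Trash"
--         else:
--             mapping[c] = "Trash"
--     return mapping
-- ===== SOURCE B (Python) =====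
-- _FLAT = (
--     [(k, "Recyclable") for k in
--      ["recyclable", "cardboard", "paper", "paperboard", "carton",
--       "plastic", "plastics", "bottle", "bottles",
--       "glass", "jar", "jars",
--       "metal", "can", "cans", "tin", "tins",
--       "aluminum", "aluminium", "steel"]] +
--     [(k, "Organic") for k in
--      ["organic", "food", "kitchen", "biodegradable", "compost",
--       "vegetable", "fruit", "leftover", "banana", "apple", "peel"]] +
--     [(k, "Trash") for k in
--      ["trash", "other", "unknown", "garbage", "waste",
--       "cloth", "clothes", "shoe", "shoes", "ceramic", "styrofoam"]]
-- )
--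
--
-- def default_coarse_map(classes):
--     # keyword-major pass: each keyword (in priority order) labels every
--     # still-unlabelled class it occurs in; unmatched classes default to Trash.
--     bases = [c.strip().lower().replace("_", " ").replace("-", " ") for c in classes]
--     labels = [None] * len(classes)
--     for k, lab in _FLAT:
--         labels = [lab if cur is None and k in base else cur
--                   for base, cur in zip(bases, labels)]
--     return {c: (cur if cur is not None else "Trash")
--             for c, cur in zip(classes, labels)}
-- ===== Notes on version B (the rewrite author's own statement) =====
-- stated objective: alternative
-- what changed: Inverts the loop nesting: instead of A's per-class if/elif cascade over three keyword sets, B flattens the groups into one priority-ordered keyword->label table and makes a keyword-major pass that fills a labels array for all classes at once (first write wins, 'Trash' default), assembling the dict at the end.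
import Mathlib
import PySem

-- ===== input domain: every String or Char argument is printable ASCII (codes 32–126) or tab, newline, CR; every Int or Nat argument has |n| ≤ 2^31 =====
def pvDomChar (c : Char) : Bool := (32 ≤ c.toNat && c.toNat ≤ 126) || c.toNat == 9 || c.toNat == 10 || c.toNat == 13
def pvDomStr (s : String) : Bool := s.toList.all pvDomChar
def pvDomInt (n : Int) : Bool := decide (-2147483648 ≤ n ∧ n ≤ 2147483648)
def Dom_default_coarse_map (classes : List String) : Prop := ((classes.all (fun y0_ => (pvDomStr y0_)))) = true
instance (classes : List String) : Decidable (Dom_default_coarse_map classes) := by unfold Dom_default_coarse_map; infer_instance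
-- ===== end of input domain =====

-- B inverts the loop nesting: a keyword-major pass over one flattened priority-ordered
-- keyword→label table fills a labels array for all classes at once (first write wins),
-- instead of A's per-class if/elif cascade over three keyword sets (alternative; same cost).


-- ===== PORT A =====
def pvRecyclableKeysA : PySem.Set String := PySem.Set.ofList
  ["recyclable", "cardboard", "paper", "paperboard", "carton",
   "plastic", "plastics", "bottle", "bottles",
   "glass", "jar", "jars",
   "metal", "can", "cans", "tin", "tins",
   "aluminum", "aluminium", "steel"]
def pvOrganicKeysA : PySem.Set String := PySem.Set.ofList
  ["organic", "food", "kitchen", "biodegradable", "compost",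
   "vegetable", "fruit", "leftover", "banana", "apple", "peel"]
def pvTrashKeysA : PySem.Set String := PySem.Set.ofList
  ["trash", "other", "unknown", "garbage", "waste",
   "cloth", "clothes", "shoe", "shoes", "ceramic", "styrofoam"]

def default_coarse_map (classes : List String) : List (String × String) :=
  (classes.foldl (fun mapping c =>
      let base := PySem.Str.replace (PySem.Str.replace (PySem.Str.lower (PySem.Str.strip c)) "_" " ") "-" " "
      if pvRecyclableKeysA.contains base || pvRecyclableKeysA.any (fun k => PySem.Str.isIn k base) then
        mapping.insert c "Recyclable"
      else if pvOrganicKeysA.contains base || pvOrganicKeysA.any (fun k => PySem.Str.isIn k base) then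
        mapping.insert c "Organic"
      else if pvTrashKeysA.contains base || pvTrashKeysA.any (fun k => PySem.Str.isIn k base) then
        mapping.insert c "Trash"
      else
        mapping.insert c "Trash")
    PySem.Dict.empty).items

-- ===== PORT B =====
-- Source B's _FLAT: flattened keyword→label table in priority order
def pvFlat : List (String × String) :=
  (["recyclable", "cardboard", "paper", "paperboard", "carton",
    "plastic", "plastics", "bottle", "bottles",
    "glass", "jar", "jars",
    "metal", "can", "cans", "tin", "tins",
    "aluminum", "aluminium", "steel"].map (fun k => (k, "Recyclable"))) ++
  (["organic", "food", "kitchen", "biodegradable", "compost",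
    "vegetable", "fruit", "leftover", "banana", "apple", "peel"].map (fun k => (k, "Organic"))) ++
  (["trash", "other", "unknown", "garbage", "waste",
    "cloth", "clothes", "shoe", "shoes", "ceramic", "styrofoam"].map (fun k => (k, "Trash")))

def pvNorm (c : String) : String :=
  PySem.Str.replace (PySem.Str.replace (PySem.Str.lower (PySem.Str.strip c)) "_" " ") "-" " "

-- one keyword-major step of Source B's loop: label every still-unlabelled class the keyword occurs in
def pvStep (bases : List String) (labels : List (Option String)) (kw : String × String) :
    List (Option String) :=
  (bases.zip labels).map (fun p =>
    if p.2.isNone && PySem.Str.isIn kw.1 p.1 then some kw.2 else p.2)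

def default_coarse_map_alt (classes : List String) : List (String × String) :=
  let bases := classes.map pvNorm
  let labels := pvFlat.foldl (pvStep bases) (classes.map (fun _ => (none : Option String)))
  (PySem.Dict.ofList ((classes.zip labels).map (fun p => (p.1, p.2.getD "Trash")))).items

-- ===== PRECONDITION & SPEC =====
def Spec_default_coarse_map (classes : List String) (out : List (String × String)) : Prop := out = default_coarse_map_alt classes
instance (classes : List String) (out : List (String × String)) : Decidable (Spec_default_coarse_map classes out) := by unfold Spec_default_coarse_map; infer_instance

-- ===== CLAIM (what is proved, stated in full; the proofs are below) =====
def Claim_equal_default_coarse_map : Prop := ∀ (classes : List String), Dom_default_coarse_map classes → Spec_default_coarse_map classes (default_coarse_map classes)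

-- ===== LEMMAS AND PROOFS =====

-- A's `base in keys or any(k in base …)` collapses to the pure substring scan:
-- exact membership implies the substring match (every string is an infix of itself).
theorem pv_cond_collapse (l : List String) (b : String) :
    ((PySem.Set.ofList l).contains b || (PySem.Set.ofList l).any (fun k => PySem.Str.isIn k b))
      = l.any (fun k => PySem.Str.isIn k b) := by
  rw [Bool.eq_iff_iff]
  simp only [Bool.or_eq_true, PySem.Set.contains_eq_decide, decide_eq_true_eq,
    List.any_eq_true, PySem.Set.mem_ofList]
  constructor
  · rintro (hb | ⟨k, hk, hin⟩)
    · exact ⟨b, hb, (PySem.Str.isIn_iff_infix b b).mpr (List.infix_refl _)⟩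
    · exact ⟨k, hk, hin⟩
  · rintro ⟨k, hk, hin⟩
    exact Or.inr ⟨k, hk, hin⟩

-- zipping a list with itself (through a previous zip) duplicates the first component
theorem pv_zip_self {α β : Type} (bases : List α) (labels : List β) :
    bases.zip (bases.zip labels) = (bases.zip labels).map (fun p => (p.1, p)) := by
  induction bases generalizing labels with
  | nil => simp
  | cons b bs ih =>
    cases labels with
    | nil => simp
    | cons o os => simp [List.zip_cons_cons, ih]

-- loop inversion: the keyword-major fold computes, per class, the first matching
-- keyword's label (keeping an already assigned label)
theorem pv_fold_invert (kws : List (String × String)) (bases : List String)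
    (labels : List (Option String)) (h : labels.length = bases.length) :
    kws.foldl (pvStep bases) labels
      = (bases.zip labels).map (fun p =>
          match p.2 with
          | some x => some x
          | none => (kws.find? (fun kw => PySem.Str.isIn kw.1 p.1)).map Prod.snd) := by
  induction kws generalizing labels with
  | nil =>
    simp only [List.foldl_nil, List.find?_nil, Option.map_none]
    have h2 : ∀ (bs : List String) (ls : List (Option String)),
        (bs.zip ls).map (fun p : String × Option String =>
          match p.2 with | some x => some x | none => none) = (bs.zip ls).map Prod.snd := by
      intro bs ls
      apply List.map_congr_left
      intro p _
      cases hp : p.2 <;> simp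
    rw [h2, List.map_snd_zip (le_of_eq h)]
  | cons kw kws ih =>
    rw [List.foldl_cons, ih _ (by simp [pvStep, h])]
    show (bases.zip (pvStep bases labels kw)).map _ = _
    rw [pvStep, List.zip_map_right, pv_zip_self, List.map_map, List.map_map]
    apply List.map_congr_left
    intro p _
    simp only [Function.comp, Prod.map, id]
    cases h2 : p.2 with
    | some x => simp
    | none =>
      simp only [Option.isNone_none, Bool.true_and, List.find?_cons]
      by_cases hin : PySem.Str.isIn kw.1 p.1 = true
      · rw [PySem.Str.isIn] at hin
        simp [hin]
      · rw [Bool.not_eq_true, PySem.Str.isIn] at hin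
        simp [hin]

-- a constant-label keyword group with no match contributes nothing to the first-match scan
theorem pv_group_none (l : List String) (lab b : String)
    (h : l.any (fun k => PySem.Str.isIn k b) = false) :
    (l.map (fun k => (k, lab))).find? (fun kw => PySem.Str.isIn kw.1 b) = none := by
  apply List.find?_eq_none.mpr
  intro x hx
  obtain ⟨k, hk, rfl⟩ := List.mem_map.mp hx
  have := List.any_eq_false.mp h k hk
  simpa using this

-- a constant-label keyword group with a match yields that label as the first match
theorem pv_group_some (l : List String) (lab b : String)
    (h : l.any (fun k => PySem.Str.isIn k b) = true) :
    ∃ k, (l.map (fun k => (k, lab))).find? (fun kw => PySem.Str.isIn kw.1 b) = some (k, lab) := by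
  obtain ⟨k, hk, hin⟩ := List.any_eq_true.mp h
  have hs : ((l.map (fun k => (k, lab))).find? (fun kw => PySem.Str.isIn kw.1 b)).isSome :=
    List.find?_isSome.mpr ⟨(k, lab), List.mem_map.mpr ⟨k, hk, rfl⟩, hin⟩
  obtain ⟨x, hx⟩ := Option.isSome_iff_exists.mp hs
  have hmem := List.mem_of_find?_eq_some hx
  obtain ⟨k', _, rfl⟩ := List.mem_map.mp hmem
  exact ⟨k', hx⟩

-- A's cascade on one class string equals B's first-match over the flat table (with default).
theorem pv_label_eq (b : String) :
    (if pvRecyclableKeysA.contains b || pvRecyclableKeysA.any (fun k => PySem.Str.isIn k b) then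
       ("Recyclable" : String)
     else if pvOrganicKeysA.contains b || pvOrganicKeysA.any (fun k => PySem.Str.isIn k b) then
       "Organic"
     else if pvTrashKeysA.contains b || pvTrashKeysA.any (fun k => PySem.Str.isIn k b) then
       "Trash"
     else
       "Trash")
    = ((pvFlat.find? (fun kw => PySem.Str.isIn kw.1 b)).map Prod.snd).getD "Trash" := by
  rw [pvRecyclableKeysA, pvOrganicKeysA, pvTrashKeysA,
    pv_cond_collapse, pv_cond_collapse, pv_cond_collapse, pvFlat,
    List.find?_append, List.find?_append]
  split_ifs with h1 h2 h3
  · obtain ⟨k, hk⟩ := pv_group_some _ "Recyclable" b h1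
    rw [hk]
    rfl
  · rw [Bool.not_eq_true] at h1
    obtain ⟨k, hk⟩ := pv_group_some _ "Organic" b h2
    rw [pv_group_none _ "Recyclable" b h1, hk]
    rfl
  · rw [Bool.not_eq_true] at h1 h2
    obtain ⟨k, hk⟩ := pv_group_some _ "Trash" b h3
    rw [pv_group_none _ "Recyclable" b h1, pv_group_none _ "Organic" b h2, hk]
    rfl
  · rw [Bool.not_eq_true] at h1 h2 h3
    rw [pv_group_none _ "Recyclable" b h1, pv_group_none _ "Organic" b h2,
      pv_group_none _ "Trash" b h3]
    rfl

-- B's per-class label, extracted in closed form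
theorem pv_alt_labels (classes : List String) :
    default_coarse_map_alt classes
      = (PySem.Dict.ofList (classes.map (fun c =>
          (c, ((pvFlat.find? (fun kw => PySem.Str.isIn kw.1 (pvNorm c))).map
                 Prod.snd).getD "Trash")))).items := by
  unfold default_coarse_map_alt
  show (PySem.Dict.ofList ((classes.zip
      (pvFlat.foldl (pvStep (classes.map pvNorm)) (classes.map (fun _ => (none : Option String))))).map
      (fun p => (p.1, p.2.getD "Trash")))).items = _
  rw [pv_fold_invert _ _ _ (by simp)]
  refine congrArg (fun l => (PySem.Dict.ofList l).items) ?_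
  induction classes with
  | nil => rfl
  | cons c cs ih =>
    simp only [List.map_cons, List.zip_cons_cons] at ih ⊢
    rw [ih]

-- ===== VERDICT (by name: the statement is the Claim_ definition above) =====
theorem default_coarse_map_spec : Claim_equal_default_coarse_map := by
  intro classes _
  show default_coarse_map classes = default_coarse_map_alt classes
  rw [pv_alt_labels]
  unfold default_coarse_map
  rw [PySem.Dict.ofList, PySem.Dict.update, List.foldl_map]
  refine congrArg PySem.Dict.items ?_
  apply List.foldl_ext
  intro m c _
  have hb : PySem.Str.replace (PySem.Str.replace (PySem.Str.lower (PySem.Str.strip c)) "_" " ") "-" " " = pvNorm c := rfl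
  dsimp only
  rw [hb, ← pv_label_eq]
  split_ifs <;> rfl
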